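-- pv_equiv track=rewrite | github.com/Kodsport/kth-challenge-2020 | bling/submissions/wrong_answer/per_never_save.py | solve
-- ===== SOURCE A (Python) =====
-- def solve(d, b, f, ef, t0, t1, t2, et0, et1, et2):
--     if d == 0: return b + 100*f + 500*ef
--
--     f += 3*t0
--     ef += 3*et0
--     (t0, t1, t2) = (t1, t2, t0)
--     (et0, et1, et2) = (et1, et2, et0)
--
--     # if we can buy an exotic fruit using bling and normal fruits,
--     # always optimal to do so
--     if b + 100*f >= 400:
--         ef += 1
--         b -= 400
--         while b < 0:
--             b += 100
--             f -= 1
--     elif ef > 0: # if we have an exotic fruit, sell it to buy another one, netting 100 bling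
--         b += 100
--
--     if d <= 3: # endgame, don't do any planting just keep going
--         return solve(d-1, b, f, ef, t0, t1, t2, et0, et1, et2)
--
--     # (incorrectly) plant all remaining fruit
--     t2 += f
--     f = 0
--     et2 += ef
--     ef = 0
--     return solve(d-1, b, f, ef, t0, t1, t2, et0, et1, et2)
-- ===== SOURCE B (Python) =====
-- def solve(d, b, f, ef, t0, t1, t2, et0, et1, et2):
--     # Iterative day-by-day loop instead of A's recursion; the inner
--     # bling-normalization while-loop is replaced by a closed-form division.
--     for day in range(d, 0, -1):
--         f += 3 * t0
--         ef += 3 * et0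
--         t0, t1, t2 = t1, t2, t0
--         et0, et1, et2 = et1, et2, et0
--         if b + 100 * f >= 400:
--             ef += 1
--             b -= 400
--             if b < 0:
--                 k = (99 - b) // 100
--                 b += 100 * k
--                 f -= k
--         elif ef > 0:
--             b += 100
--         if day > 3:
--             t2 += f
--             f = 0
--             et2 += ef
--             ef = 0
--     return b + 100 * f + 500 * ef
-- ===== Notes on version B (the rewrite author's own statement) =====
-- stated objective: idiomatic
-- what changed: Recursion replaced by an iterative for-loop over the days with mutable state, and the inner b<0 normalization while-loop replaced by a closed-form floor-division computing how many fruits to sell at once.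
import Mathlib
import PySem

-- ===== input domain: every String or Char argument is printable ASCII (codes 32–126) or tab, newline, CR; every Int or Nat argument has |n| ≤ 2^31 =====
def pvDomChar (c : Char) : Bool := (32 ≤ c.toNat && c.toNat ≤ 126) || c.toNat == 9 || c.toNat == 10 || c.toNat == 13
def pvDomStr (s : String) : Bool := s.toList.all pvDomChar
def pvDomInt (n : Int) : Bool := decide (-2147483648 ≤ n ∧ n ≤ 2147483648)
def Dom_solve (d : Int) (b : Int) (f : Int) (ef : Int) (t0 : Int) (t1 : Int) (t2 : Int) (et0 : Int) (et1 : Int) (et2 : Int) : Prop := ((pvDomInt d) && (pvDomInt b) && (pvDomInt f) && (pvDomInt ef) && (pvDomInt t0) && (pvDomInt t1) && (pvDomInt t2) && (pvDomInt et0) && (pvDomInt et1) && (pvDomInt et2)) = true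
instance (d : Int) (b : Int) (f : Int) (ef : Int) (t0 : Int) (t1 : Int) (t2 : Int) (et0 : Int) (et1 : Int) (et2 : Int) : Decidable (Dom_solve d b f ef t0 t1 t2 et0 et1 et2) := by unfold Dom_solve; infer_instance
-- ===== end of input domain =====

-- B replaces A's day-by-day recursion with an iterative loop over range(d,0,-1) and
-- the inner b<0 normalization while-loop with a closed-form floor division (objective: idiomatic).

-- ===== PORT A =====
-- A's inner 'while b < 0: b += 100; f -= 1'
def sellLoop (b f : Int) : Int × Int :=
  if b < 0 then sellLoop (b + 100) (f - 1) else (b, f)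
termination_by (-b).toNat
decreasing_by omega

-- A's recursion; the day counter d (known nonnegative under Pre_) runs as a Nat fuel
def solveGo : Nat → Int → Int → Int → Int → Int → Int → Int → Int → Int → Int
  | 0, b, f, ef, _, _, _, _, _, _ => b + 100 * f + 500 * ef
  | Nat.succ n, b, f, ef, t0, t1, t2, et0, et1, et2 =>
    let f := f + 3 * t0
    let ef := ef + 3 * et0
    let (t0, t1, t2) := (t1, t2, t0)
    let (et0, et1, et2) := (et1, et2, et0)
    let (b, f, ef) :=
      if b + 100 * f ≥ 400 then
        let p := sellLoop (b - 400) f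
        (p.1, p.2, ef + 1)
      else if ef > 0 then (b + 100, f, ef)
      else (b, f, ef)
    if (n : Int) + 1 ≤ 3 then
      solveGo n b f ef t0 t1 t2 et0 et1 et2
    else
      solveGo n b 0 0 t0 t1 (t2 + f) et0 et1 (et2 + ef)

def solve (d : Int) (b : Int) (f : Int) (ef : Int) (t0 : Int) (t1 : Int) (t2 : Int) (et0 : Int) (et1 : Int) (et2 : Int) : Int :=
  solveGo d.toNat b f ef t0 t1 t2 et0 et1 et2

-- ===== PORT B =====
-- one iteration of B's for-loop body (state = (b,f,ef,t0,t1,t2,et0,et1,et2))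
def stepB (day : Int) (s : Int × Int × Int × Int × Int × Int × Int × Int × Int) :
    Int × Int × Int × Int × Int × Int × Int × Int × Int :=
  match s with
  | (b, f, ef, t0, t1, t2, et0, et1, et2) =>
    let f := f + 3 * t0
    let ef := ef + 3 * et0
    let (t0, t1, t2) := (t1, t2, t0)
    let (et0, et1, et2) := (et1, et2, et0)
    let (b, f, ef) :=
      if b + 100 * f ≥ 400 then
        let ef := ef + 1
        let b := b - 400
        if b < 0 then
          let k := PySem.Int.floordiv (99 - b) 100
          (b + 100 * k, f - k, ef)
        else (b, f, ef)
      else if ef > 0 then (b + 100, f, ef)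
      else (b, f, ef)
    if day > 3 then (b, 0, 0, t0, t1, t2 + f, et0, et1, et2 + ef)
    else (b, f, ef, t0, t1, t2, et0, et1, et2)

def solve_alt (d : Int) (b : Int) (f : Int) (ef : Int) (t0 : Int) (t1 : Int) (t2 : Int) (et0 : Int) (et1 : Int) (et2 : Int) : Int :=
  let s := (PySem.List.pyRange d 0 (-1)).foldl (fun s day => stepB day s)
    (b, f, ef, t0, t1, t2, et0, et1, et2)
  s.1 + 100 * s.2.1 + 500 * s.2.2.1

-- ===== PRECONDITION & SPEC =====
-- Pre_ excludes d < 0 (A recurses forever / hits the recursion limit) and d > 900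
-- (A raises RecursionError near Python's default recursion limit of 1000).
def Pre_solve (d : Int) (b : Int) (f : Int) (ef : Int) (t0 : Int) (t1 : Int) (t2 : Int) (et0 : Int) (et1 : Int) (et2 : Int) : Prop :=
  0 ≤ d ∧ d ≤ 900
instance (d : Int) (b : Int) (f : Int) (ef : Int) (t0 : Int) (t1 : Int) (t2 : Int) (et0 : Int) (et1 : Int) (et2 : Int) : Decidable (Pre_solve d b f ef t0 t1 t2 et0 et1 et2) := by unfold Pre_solve; infer_instance

def pvWitness_solve : Int × Int × Int × Int × Int × Int × Int × Int × Int × Int :=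
  (7, 10, 2, 0, 1, 1, 1, 0, 0, 0)

def Spec_solve (d : Int) (b : Int) (f : Int) (ef : Int) (t0 : Int) (t1 : Int) (t2 : Int) (et0 : Int) (et1 : Int) (et2 : Int) (out : Int) : Prop := out = solve_alt d b f ef t0 t1 t2 et0 et1 et2
instance (d : Int) (b : Int) (f : Int) (ef : Int) (t0 : Int) (t1 : Int) (t2 : Int) (et0 : Int) (et1 : Int) (et2 : Int) (out : Int) : Decidable (Spec_solve d b f ef t0 t1 t2 et0 et1 et2 out) := by unfold Spec_solve; infer_instance

-- ===== CLAIM (what is proved, stated in full; the proofs are below) =====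
def Claim_equal_solve : Prop := ∀ (d : Int) (b : Int) (f : Int) (ef : Int) (t0 : Int) (t1 : Int) (t2 : Int) (et0 : Int) (et1 : Int) (et2 : Int), Dom_solve d b f ef t0 t1 t2 et0 et1 et2 → Pre_solve d b f ef t0 t1 t2 et0 et1 et2 → Spec_solve d b f ef t0 t1 t2 et0 et1 et2 (solve d b f ef t0 t1 t2 et0 et1 et2)

-- ===== LEMMAS AND PROOFS =====

-- A's while-loop equals B's closed-form division
lemma sellLoop_eq (b f : Int) :
    sellLoop b f =
      if b < 0 then
        (b + 100 * PySem.Int.floordiv (99 - b) 100, f - PySem.Int.floordiv (99 - b) 100)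
      else (b, f) := by
  have hfd : ∀ a : Int, PySem.Int.floordiv a 100 = a / 100 :=
    fun a => PySem.Int.floordiv_eq_ediv_of_pos (by norm_num)
  induction b, f using sellLoop.induct with
  | case1 b f hb ih =>
    rw [sellLoop, if_pos hb, ih]
    simp only [hfd]
    by_cases h2 : b + 100 < 0
    · rw [if_pos h2, if_pos hb, Prod.mk.injEq]
      have : (99 - (b + 100)) / 100 = (99 - b) / 100 - 1 := by omega
      rw [this]; constructor <;> ring
    · rw [if_neg h2, if_pos hb, Prod.mk.injEq]
      have : (99 - b) / 100 = 1 := by omega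
      rw [this]; constructor <;> ring
  | case2 b f hb => rw [sellLoop, if_neg hb, if_neg hb]

lemma go_eq (n : Nat) : ∀ (b f ef t0 t1 t2 et0 et1 et2 : Int),
    solveGo n b f ef t0 t1 t2 et0 et1 et2 =
      (let s := (PySem.List.pyRange (n : Int) 0 (-1)).foldl (fun s day => stepB day s)
          (b, f, ef, t0, t1, t2, et0, et1, et2)
       s.1 + 100 * s.2.1 + 500 * s.2.2.1) := by
  induction n with
  | zero =>
    intro b f ef t0 t1 t2 et0 et1 et2
    rw [PySem.List.pyRange_neg_one_eq_nil (by norm_num)]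
    simp [solveGo]
  | succ n ih =>
    intro b f ef t0 t1 t2 et0 et1 et2
    have hcons : PySem.List.pyRange ((n : Nat) + 1 : Int) 0 (-1)
        = ((n : Nat) + 1 : Int) :: PySem.List.pyRange ((n : Nat) + 1 - 1 : Int) 0 (-1) :=
      PySem.List.pyRange_neg_one_cons (by positivity)
    have hsub : ((n : Nat) + 1 - 1 : Int) = (n : Int) := by ring
    rw [show ((n : Nat) + 1 : Nat) = Nat.succ n from rfl] at *
    simp only [solveGo]
    push_cast
    rw [hsub] at hcons
    rw [hcons]
    simp only [List.foldl_cons]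
    rw [stepB, sellLoop_eq]
    by_cases hbuy : b + 100 * (f + 3 * t0) ≥ 400
    · simp only [if_pos hbuy]
      by_cases hneg : b - 400 < 0
      · simp only [if_pos hneg]
        by_cases hday : ((n : Int) + 1 ≤ 3)
        · rw [if_pos hday, if_neg (by omega : ¬ ((n : Int) + 1 > 3)), ih]
        · rw [if_neg hday, if_pos (by omega : (n : Int) + 1 > 3), ih]
      · simp only [if_neg hneg]
        by_cases hday : ((n : Int) + 1 ≤ 3)
        · rw [if_pos hday, if_neg (by omega : ¬ ((n : Int) + 1 > 3)), ih]
        · rw [if_neg hday, if_pos (by omega : (n : Int) + 1 > 3), ih]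
    · simp only [if_neg hbuy]
      by_cases hef : ef + 3 * et0 > 0
      · simp only [if_pos hef]
        by_cases hday : ((n : Int) + 1 ≤ 3)
        · rw [if_pos hday, if_neg (by omega : ¬ ((n : Int) + 1 > 3)), ih]
        · rw [if_neg hday, if_pos (by omega : (n : Int) + 1 > 3), ih]
      · simp only [if_neg hef]
        by_cases hday : ((n : Int) + 1 ≤ 3)
        · rw [if_pos hday, if_neg (by omega : ¬ ((n : Int) + 1 > 3)), ih]
        · rw [if_neg hday, if_pos (by omega : (n : Int) + 1 > 3), ih]

-- ===== VERDICT (by name: the statement is the Claim_ definition above) =====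
theorem solve_spec : Claim_equal_solve := by
  intro d b f ef t0 t1 t2 et0 et1 et2 _ hpre
  unfold Spec_solve solve solve_alt
  have hd : ((d.toNat : Nat) : Int) = d := Int.toNat_of_nonneg hpre.1
  rw [go_eq]
  rw [hd]
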